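-- pv_equiv track=rewrite | github.com/wbfw109/study-core | src/python/wbfw109/algorithms/_practice/programmers/lv0.py | solution_181829
-- ===== SOURCE A (Python) =====
-- def solution_181829(board: list[list[int]], k: int) -> int:
--     """이차원 배열 대각선 순회하기 ; https://school.programmers.co.kr/learn/courses/30/lessons/181829"""
--     return sum(
--         (
--             board[i][j]
--             for i in range(len(board))
--             for j in range(len(board[0]))
--             if i + j <= k
--         )
--     )
-- ===== SOURCE B (Python) =====
-- def solution_181829(board: list[list[int]], k: int) -> int:
--     """Per-row prefix sums: row i contributes sum(row[:t]) with t = min(m, k - i + 1)."""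
--     if not board:
--         return 0
--     m = len(board[0])
--     total = 0
--     for i, row in enumerate(board):
--         t = min(m, k - i + 1)
--         if t > 0:
--             total += sum(row[:t])
--     return total
-- ===== Notes on version B (the rewrite author's own statement) =====
-- stated objective: alternative
-- what changed: Replaces the per-cell i+j<=k guard over the full n*m grid with one prefix-slice sum per row: row i contributes sum(row[:min(m, k-i+1)]), skipping rows and cells outside the triangle.
import Mathlib
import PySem

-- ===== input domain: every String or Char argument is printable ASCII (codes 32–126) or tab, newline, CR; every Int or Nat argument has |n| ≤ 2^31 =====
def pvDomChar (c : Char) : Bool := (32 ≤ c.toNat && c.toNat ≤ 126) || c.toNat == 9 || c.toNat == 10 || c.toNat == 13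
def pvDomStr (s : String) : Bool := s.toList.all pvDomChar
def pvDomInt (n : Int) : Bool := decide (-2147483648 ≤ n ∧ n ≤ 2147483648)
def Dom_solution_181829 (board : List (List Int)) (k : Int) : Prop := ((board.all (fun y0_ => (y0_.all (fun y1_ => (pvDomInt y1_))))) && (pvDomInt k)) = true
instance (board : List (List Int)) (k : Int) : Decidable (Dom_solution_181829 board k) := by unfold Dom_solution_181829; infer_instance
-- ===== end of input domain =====

-- B sums a clamped prefix slice of each row instead of testing i+j<=k on every cell of the grid.

-- ===== PORT A =====
-- sum(board[i][j] for i in range(len(board)) for j in range(len(board[0])) if i+j<=k)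
-- len(board[0]) is only reached when the outer range is nonempty; pyGetD's default [] gives the
-- same empty inner range on an empty board, so the value agrees. Out-of-range board[i][j]
-- (Python IndexError) is excluded by Pre_solution_181829, so the getD default 0 is never used there.
def solution_181829 (board : List (List Int)) (k : Int) : Int :=
  (PySem.List.pyRange 0 (board.length : Int)).foldl (fun acc i =>
    (PySem.List.pyRange 0 ((PySem.List.pyGetD board 0 []).length : Int)).foldl (fun acc2 j =>
      if i + j ≤ k then acc2 + PySem.List.pyGetD (PySem.List.pyGetD board i []) j 0 else acc2) acc) 0

-- ===== PORT B =====
def solution_181829_alt (board : List (List Int)) (k : Int) : Int :=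
  match board with
  | [] => 0
  | r0 :: _ =>
    let m : Int := (r0.length : Int)
    (PySem.List.enumerate board).foldl (fun total p =>
      let t := min m (k - p.1 + 1)
      if 0 < t then total + (PySem.List.slice p.2 none (some t)).sum else total) 0

-- ===== PRECONDITION & SPEC =====
-- Pre_ is exactly A's domain: every qualifying cell (j < len(board[0]), i + j ≤ k) exists in row i;
-- outside it A raises IndexError (ragged board with a too-short row inside the triangle).
def Pre_solution_181829 (board : List (List Int)) (k : Int) : Prop :=
  ∀ i : Nat, i < board.length → ∀ j : Nat, j < (board.headD []).length →
    (i : Int) + (j : Int) ≤ k → j < (board.getD i []).length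
instance (board : List (List Int)) (k : Int) : Decidable (Pre_solution_181829 board k) := by
  unfold Pre_solution_181829; infer_instance
def pvWitness_solution_181829 : List (List Int) × Int := ([[1, 2], [3, 4]], 1)

def Spec_solution_181829 (board : List (List Int)) (k : Int) (out : Int) : Prop := out = solution_181829_alt board k
instance (board : List (List Int)) (k : Int) (out : Int) : Decidable (Spec_solution_181829 board k out) := by unfold Spec_solution_181829; infer_instance

-- ===== CLAIM (what is proved, stated in full; the proofs are below) =====
def Claim_equal_solution_181829 : Prop := ∀ (board : List (List Int)) (k : Int), Dom_solution_181829 board k → Pre_solution_181829 board k → Spec_solution_181829 board k (solution_181829 board k)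
-- ===== LEMMAS AND PROOFS =====

-- A's inner loop over j ∈ range(m) with the guard j ≤ c sums the prefix of r of length min m (c+1).toNat.
lemma inner_fold_eq_take (r : List Int) (c : Int) (m : Nat) (acc : Int)
    (h : ∀ j : Nat, j < m → (j : Int) ≤ c → j < r.length) :
    (PySem.List.pyRange 0 (m : Int)).foldl
      (fun acc2 j => if j ≤ c then acc2 + PySem.List.pyGetD r j 0 else acc2) acc
    = acc + (r.take (min m (c + 1).toNat)).sum := by
  induction m generalizing acc with
  | zero => simp [PySem.List.pyRange]
  | succ m ih =>
    have hstep : PySem.List.pyRange 0 ((m : Int) + 1) = PySem.List.pyRange 0 (m : Int) ++ [(m : Int)] :=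
      PySem.List.pyRange_one_succ_right (by positivity)
    have hm1 : ((m + 1 : Nat) : Int) = (m : Int) + 1 := by push_cast; ring
    rw [hm1, hstep, List.foldl_append,
        ih acc (fun j hj hjc => h j (by omega) hjc)]
    simp only [List.foldl_cons, List.foldl_nil]
    by_cases hc : (m : Int) ≤ c
    · have hmr : m < r.length := h m (by omega) hc
      have h1 : min (m + 1) (c + 1).toNat = m + 1 := by omega
      have h2 : min m (c + 1).toNat = m := by omega
      rw [if_pos hc, h1, h2, PySem.List.pyGetD_natCast]
      rw [List.take_add_one, List.sum_append, List.getD_eq_getElem r 0 hmr]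
      simp [List.getElem?_eq_getElem hmr]
      ring
    · have h1 : min (m + 1) (c + 1).toNat = min m (c + 1).toNat := by omega
      rw [if_neg hc, h1]

-- B's per-row contribution equals the same prefix sum.
lemma slice_term_eq_take (r : List Int) (m : Nat) (k' : Int) (t : Int) (ht : t = min (m : Int) (k' + 1)) :
    (if 0 < t then (PySem.List.slice r none (some t)).sum else 0)
    = (r.take (min m (k' + 1).toNat)).sum := by
  by_cases h : 0 < t
  · have htn : t = ((min m (k' + 1).toNat : Nat) : Int) := by omega
    rw [if_pos h, htn, PySem.List.slice_to_natCast]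
  · have : min m (k' + 1).toNat = 0 := by omega
    rw [if_neg h, this]
    simp

-- ===== VERDICT (by name: the statement is the Claim_ definition above) =====
theorem solution_181829_spec : Claim_equal_solution_181829 := by
  intro board k _ hpre
  unfold Spec_solution_181829
  cases board with
  | nil => rfl
  | cons r0 rest =>
    have hA : solution_181829 (r0 :: rest) k
        = ((PySem.List.pyRange 0 ((r0 :: rest).length : Int)).map
            (fun i => ((PySem.List.pyGetD (r0 :: rest) i []).take (min r0.length (k - i + 1).toNat)).sum)).sum := by
      unfold solution_181829
      rw [PySem.List.foldl_congr_mem _ _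
            (fun acc i => acc + ((PySem.List.pyGetD (r0 :: rest) i []).take (min r0.length (k - i + 1).toNat)).sum) _
            ?_]
      · rw [PySem.List.foldl_add]; ring
      · intro acc i hi
        rw [PySem.List.mem_pyRange_one] at hi
        obtain ⟨iN, rfl⟩ : ∃ iN : Nat, i = (iN : Int) := ⟨i.toNat, by omega⟩
        have hiN : iN < (r0 :: rest).length := by exact_mod_cast hi.2
        simp only [PySem.List.pyGetD_natCast]
        have hm0 : PySem.List.pyGetD (r0 :: rest) 0 [] = r0 := by
          rw [show (0:Int) = ((0:Nat):Int) from rfl, PySem.List.pyGetD_natCast]; rfl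
        rw [hm0]
        have hinner := inner_fold_eq_take ((r0 :: rest).getD iN []) (k - iN) r0.length acc
          (fun j hj hjc => by
            have := hpre iN hiN j (by simpa using hj) (by omega)
            simpa using this)
        rw [← hinner]
        apply PySem.List.foldl_congr_mem
        intro acc2 j _
        by_cases hx : (iN : Int) + j ≤ k
        · rw [if_pos hx, if_pos (by omega)]
        · rw [if_neg hx, if_neg (by omega)]
    have hB : solution_181829_alt (r0 :: rest) k
        = ((PySem.List.pyRange 0 ((r0 :: rest).length : Int)).map
            (fun i => ((PySem.List.pyGetD (r0 :: rest) i []).take (min r0.length (k - i + 1).toNat)).sum)).sum := by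
      show (PySem.List.enumerate (r0 :: rest)).foldl
          (fun total p =>
            if 0 < min ((r0.length : Nat) : Int) (k - p.1 + 1)
            then total + (PySem.List.slice p.2 none (some (min ((r0.length : Nat) : Int) (k - p.1 + 1)))).sum
            else total) 0 = _
      rw [PySem.List.enumerate_eq_map_pyRange (r0 :: rest) ([] : List Int), List.foldl_map]
      rw [PySem.List.foldl_congr_mem _ _
            (fun total i => total + ((PySem.List.pyGetD (r0 :: rest) i []).take (min r0.length (k - i + 1).toNat)).sum) _
            ?_]
      · rw [PySem.List.foldl_add]
        rw [show PySem.List.len (r0 :: rest) = ((r0 :: rest).length : Int) from rfl]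
        ring
      · intro total i _
        have hterm := slice_term_eq_take (PySem.List.pyGetD (r0 :: rest) i []) r0.length (k - i)
          (min ((r0.length : Nat) : Int) (k - i + 1)) rfl
        simp only []
        rw [← hterm]
        by_cases hx : 0 < min ((r0.length : Nat) : Int) (k - i + 1)
        · rw [if_pos hx, if_pos hx]
        · rw [if_neg hx, if_neg hx]; ring
    rw [hA, hB]
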